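-- pv_equiv track=rewrite | github.com/ichigo333/leetcode | python/even_letters.py | simpleEvenLetters
-- ===== SOURCE A (Python) =====
-- def simpleEvenLetters(letters: str):
--     count = 0
--     letter_dict = {}
--
--     for char in letters:
--         letter_dict[char] = letter_dict.get(char, 0) + 1
--
--
--     for char in letter_dict:
--         if letter_dict[char] % 2 > 0:
--             count +=1
--
--     return count
-- ===== SOURCE B (Python) =====
-- def simpleEvenLetters(letters: str):
--     odd = set()
--     for char in letters:
--         if char in odd:
--             odd.remove(char)
--         else:
--             odd.add(char)
--     return len(odd)
-- ===== Notes on version B (the rewrite author's own statement) =====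
-- stated objective: idiomatic
-- what changed: Replaces the count dictionary plus a second modulo pass over its keys with a single pass that toggles each character in a parity set and returns its size.
import Mathlib
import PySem

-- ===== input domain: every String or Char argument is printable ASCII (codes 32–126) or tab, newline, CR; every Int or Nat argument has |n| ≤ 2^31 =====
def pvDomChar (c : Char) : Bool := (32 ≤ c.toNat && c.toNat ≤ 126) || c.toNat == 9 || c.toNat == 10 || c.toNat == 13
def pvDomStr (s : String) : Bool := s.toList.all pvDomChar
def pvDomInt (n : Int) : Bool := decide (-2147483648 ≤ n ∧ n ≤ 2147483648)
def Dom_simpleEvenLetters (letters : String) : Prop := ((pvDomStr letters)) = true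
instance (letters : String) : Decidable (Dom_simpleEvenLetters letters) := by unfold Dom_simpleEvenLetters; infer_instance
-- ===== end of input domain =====

-- B replaces A's count dictionary + second modulo pass with a single pass toggling a parity set (idiomatic, one pass).

-- ===== PORT A =====
def simpleEvenLetters (letters : String) : Int :=
  let letterDict := letters.toList.foldl
    (fun d c => d.insert c (d.getD c 0 + 1)) (PySem.Dict.empty : PySem.Dict Char Int)
  letterDict.keys.foldl
    (fun count c => if PySem.Int.mod (letterDict.getD c 0) 2 > 0 then count + 1 else count) 0

-- ===== PORT B =====
def simpleEvenLetters_alt (letters : String) : Int :=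
  let odd := letters.toList.foldl
    (fun s c => if PySem.Set.contains s c then PySem.Set.discard s c else PySem.Set.add s c)
    (PySem.Set.empty : PySem.Set Char)
  (PySem.Set.len odd : Int)

-- ===== PRECONDITION & SPEC =====
def Spec_simpleEvenLetters (letters : String) (out : Int) : Prop := out = simpleEvenLetters_alt letters
instance (letters : String) (out : Int) : Decidable (Spec_simpleEvenLetters letters out) := by unfold Spec_simpleEvenLetters; infer_instance

-- ===== CLAIM (what is proved, stated in full; the proofs are below) =====
def Claim_equal_simpleEvenLetters : Prop := ∀ (letters : String), Dom_simpleEvenLetters letters → Spec_simpleEvenLetters letters (simpleEvenLetters letters)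

-- ===== LEMMAS AND PROOFS =====

-- parity toggles on +1
lemma pvModTwoSucc (n : Int) : (PySem.Int.mod (n + 1) 2 > 0) ↔ ¬ (PySem.Int.mod n 2 > 0) := by
  rw [PySem.Int.mod_eq_emod_of_pos (by norm_num : (0:Int) < 2),
      PySem.Int.mod_eq_emod_of_pos (by norm_num : (0:Int) < 2)]
  omega

-- loop invariant: the parity set holds exactly the keys with odd count in the dict
lemma pvInv (cs : List Char) :
    ∀ (d : PySem.Dict Char Int) (s : PySem.Set Char), s.Nodup →
    (∀ c, c ∈ s ↔ PySem.Int.mod (d.getD c 0) 2 > 0) →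
    (cs.foldl (fun s c => if PySem.Set.contains s c then PySem.Set.discard s c else PySem.Set.add s c) s).Nodup ∧
    (∀ c, c ∈ cs.foldl (fun s c => if PySem.Set.contains s c then PySem.Set.discard s c else PySem.Set.add s c) s ↔
      PySem.Int.mod ((cs.foldl (fun d c => d.insert c (d.getD c 0 + 1)) d).getD c 0) 2 > 0) := by
  induction cs with
  | nil => intro d s hnd hmem; exact ⟨hnd, hmem⟩
  | cons c cs ih =>
    intro d s hnd hmem
    simp only [List.foldl_cons]
    by_cases hc : c ∈ s
    · rw [if_pos (by simpa [PySem.Set.contains_iff] using hc)]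
      refine ih _ _ (PySem.Set.nodup_discard _ _ hnd) ?_
      intro c'
      rw [PySem.Set.mem_discard, PySem.Dict.getD_insert]
      by_cases h : c' = c
      · subst h
        rw [if_pos rfl]
        simp only [ne_eq, not_true_eq_false, and_false, false_iff]
        rw [pvModTwoSucc]
        simpa using (hmem c').mp hc
      · simp [h, hmem c']
    · rw [if_neg (by simpa [PySem.Set.contains_iff] using hc)]
      refine ih _ _ (PySem.Set.nodup_add _ _ hnd) ?_
      intro c'
      rw [PySem.Set.mem_add, PySem.Dict.getD_insert]
      by_cases h : c' = c
      · subst h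
        rw [if_pos rfl]
        simp only [or_true, true_iff]
        rw [pvModTwoSucc]
        simpa using fun hh => hc ((hmem c').mpr hh)
      · simp [h, hmem c']

-- A's counting loop is a countP over the keys
lemma pvCountLoop (l : List Char) (p : Char → Prop) [DecidablePred p] :
    l.foldl (fun (count : Int) c => if p c then count + 1 else count) 0
      = (l.filter (fun c => decide (p c))).length := by
  have h : ∀ (init : Int), l.foldl (fun (count : Int) c => if p c then count + 1 else count) init
      = init + (l.filter (fun c => decide (p c))).length := by
    induction l with
    | nil => simp
    | cons x xs ih =>
      intro init
      by_cases hx : p x <;> simp [hx, ih] <;> ring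
  simpa using h 0

-- ===== VERDICT (by name: the statement is the Claim_ definition above) =====
theorem simpleEvenLetters_spec : Claim_equal_simpleEvenLetters := by
  intro letters _
  unfold Spec_simpleEvenLetters simpleEvenLetters simpleEvenLetters_alt
  set cs := letters.toList with hcs
  set d := cs.foldl (fun d c => d.insert c (d.getD c 0 + 1)) (PySem.Dict.empty : PySem.Dict Char Int) with hd
  set s := cs.foldl (fun s c => if PySem.Set.contains s c then PySem.Set.discard s c else PySem.Set.add s c) (PySem.Set.empty : PySem.Set Char) with hs
  obtain ⟨hnd, hmem⟩ := pvInv cs PySem.Dict.empty PySem.Set.empty (by simp [PySem.Set.empty])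
    (by intro c; simp [PySem.Dict.getD_empty, PySem.Int.mod])
  have hkeys : d.keys.Nodup := by
    rw [hd]; exact PySem.Dict.nodup_keys_foldl_insert cs _ _ (by simp)
  have hperm : (d.keys.filter (fun c => decide (PySem.Int.mod (d.getD c 0) 2 > 0))).Perm s := by
    rw [List.perm_ext_iff_of_nodup (hkeys.filter _) hnd]
    intro c
    rw [List.mem_filter, hmem c]
    constructor
    · rintro ⟨-, h⟩; simpa using h
    · intro h
      refine ⟨?_, by simpa using h⟩
      rw [← PySem.Dict.contains_iff_mem_keys]
      by_contra hnc
      have h0 : d.getD c 0 = 0 := PySem.Dict.getD_of_not_contains d 0 (by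
        cases hcon : d.contains c
        · rfl
        · exact absurd hcon hnc)
      rw [h0] at h
      simp [PySem.Int.mod] at h
  dsimp only
  rw [pvCountLoop d.keys (fun c => PySem.Int.mod (d.getD c 0) 2 > 0)]
  rw [hperm.length_eq]
  simp [PySem.Set.len]
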